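-- pv_equiv track=rewrite | github.com/swapnanildutta/Hackerrank-Codes | 30 Days of Code (Python)/D29-Bitwise-AND.py | maxbit
-- ===== SOURCE A (Python) =====
-- def maxbit(n, k):
--     m = 0
--     #for i,j in combinations(range(1,n+1), 2):
--     for i in range(1, n + 1):
--         for j in range(1, i):
--             x = i & j
--             if (m < x < k):
--                 m = x
--                 if (m == (k - 1)):
--                     return m
--     return m
-- ===== SOURCE B (Python) =====
-- def maxbit(n, k):
--     # Closed-form: the answer is the largest v in [1, min(k-1, n-1)] whose
--     # smallest strict bit-superset v | (v+1) fits within n; the while loop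
--     # runs at most twice.
--     if n < 2 or k <= 1:
--         return 0
--     v = min(k - 1, n - 1)
--     while v > 0:
--         if (v | (v + 1)) <= n:
--             return v
--         v -= 1
--     return 0
-- ===== Notes on version B (the rewrite author's own statement) =====
-- stated objective: faster
-- what changed: Replaces the O(n^2) scan over all pairs with a closed-form search: the answer is the largest v <= min(k-1, n-1) whose smallest strict bit-superset v|(v+1) is <= n, found by a loop that runs at most twice.
import Mathlib
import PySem

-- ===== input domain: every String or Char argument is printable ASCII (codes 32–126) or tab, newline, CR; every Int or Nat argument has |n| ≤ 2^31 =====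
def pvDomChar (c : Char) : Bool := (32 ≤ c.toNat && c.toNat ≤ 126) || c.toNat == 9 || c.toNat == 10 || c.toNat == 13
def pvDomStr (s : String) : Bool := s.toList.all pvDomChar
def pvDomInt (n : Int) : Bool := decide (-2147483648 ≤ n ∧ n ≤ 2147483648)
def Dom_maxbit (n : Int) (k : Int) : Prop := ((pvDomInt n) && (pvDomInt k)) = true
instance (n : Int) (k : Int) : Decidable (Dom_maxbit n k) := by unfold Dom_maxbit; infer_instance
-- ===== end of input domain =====

-- B replaces A's O(n^2) scan over all pairs by an O(1) search: the answer is the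
-- largest v ≤ min(k-1, n-1) whose smallest strict bit-superset v|(v+1) is ≤ n.

-- ===== PORT A =====
-- inner 'for j in range(1, i)' loop (j counts up lazily, as Python's range does);
-- second component of the result = early 'return' taken
def maxbitInner (k i : Int) (j m : Int) : Int × Bool :=
  if h : j < i then
    let x := PySem.Int.band i j
    if m < x ∧ x < k then
      if x = k - 1 then (x, true)
      else maxbitInner k i (j + 1) x
    else maxbitInner k i (j + 1) m
  else (m, false)
termination_by (i - j).toNat
decreasing_by all_goals omega

-- outer 'for i in range(1, n + 1)' loop
def maxbitOuter (n k : Int) (i m : Int) : Int :=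
  if h : i < n + 1 then
    let r := maxbitInner k i 1 m
    if r.2 then r.1 else maxbitOuter n k (i + 1) r.1
  else m
termination_by (n + 1 - i).toNat
decreasing_by omega

def maxbit (n : Int) (k : Int) : Int := maxbitOuter n k 1 0

-- ===== PORT B =====
-- 'while v > 0: if (v | (v+1)) <= n: return v; v -= 1', v counted down from t
def maxbitLoop (n : Int) : Nat → Int
  | 0 => 0
  | t + 1 =>
    let v : Int := (t : Int) + 1
    if PySem.Int.bor v (v + 1) ≤ n then v else maxbitLoop n t

def maxbit_alt (n : Int) (k : Int) : Int :=
  if n < 2 ∨ k ≤ 1 then 0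
  else maxbitLoop n (min (k - 1) (n - 1)).toNat

-- ===== PRECONDITION & SPEC =====
def Spec_maxbit (n : Int) (k : Int) (out : Int) : Prop := out = maxbit_alt n k
instance (n : Int) (k : Int) (out : Int) : Decidable (Spec_maxbit n k out) := by unfold Spec_maxbit; infer_instance

-- ===== CLAIM (what is proved, stated in full; the proofs are below) =====
def Claim_equal_maxbit : Prop := ∀ (n : Int) (k : Int), Dom_maxbit n k → Spec_maxbit n k (maxbit n k)

-- ===== LEMMAS AND PROOFS =====

-- list-based replay of A's two loops (the ranges materialized), used only in proofs
def maxbitInnerL (k i : Int) : List Int → Int → Int × Bool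
  | [], m => (m, false)
  | j :: js, m =>
    let x := PySem.Int.band i j
    if m < x ∧ x < k then
      if x = k - 1 then (x, true)
      else maxbitInnerL k i js x
    else maxbitInnerL k i js m

def maxbitOuterL (k : Int) : List Int → Int → Int
  | [], m => m
  | i :: is, m =>
    let r := maxbitInnerL k i (PySem.List.pyRange 1 i 1) m
    if r.2 then r.1 else maxbitOuterL k is r.1

theorem pyRange_one_nil (a b : Int) (h : b ≤ a) : PySem.List.pyRange a b 1 = [] := by
  rw [PySem.List.pyRange_one]
  have : (b - a).toNat = 0 := by omega
  rw [this]
  simp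

theorem maxbitInner_eq_list : ∀ (f : Nat) (k i j m : Int), (i - j).toNat ≤ f →
    maxbitInner k i j m = maxbitInnerL k i (PySem.List.pyRange j i 1) m := by
  intro f
  induction f with
  | zero =>
      intro k i j m hf
      have hji : ¬ j < i := by omega
      rw [maxbitInner, dif_neg hji, pyRange_one_nil j i (by omega)]
      rfl
  | succ f ih =>
      intro k i j m hf
      by_cases hji : j < i
      · rw [maxbitInner, dif_pos hji, PySem.List.pyRange_one_cons hji]
        simp only [maxbitInnerL]
        split_ifs with h1 h2
        · rfl
        · exact ih k i (j + 1) _ (by omega)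
        · exact ih k i (j + 1) _ (by omega)
      · rw [maxbitInner, dif_neg hji, pyRange_one_nil j i (by omega)]
        rfl

theorem maxbitOuter_eq_list : ∀ (f : Nat) (n k i m : Int), (n + 1 - i).toNat ≤ f →
    maxbitOuter n k i m = maxbitOuterL k (PySem.List.pyRange i (n + 1) 1) m := by
  intro f
  induction f with
  | zero =>
      intro n k i m hf
      have hni : ¬ i < n + 1 := by omega
      rw [maxbitOuter, dif_neg hni, pyRange_one_nil i (n + 1) (by omega)]
      rfl
  | succ f ih =>
      intro n k i m hf
      by_cases hni : i < n + 1
      · rw [maxbitOuter, dif_pos hni, PySem.List.pyRange_one_cons hni]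
        simp only [maxbitOuterL]
        rw [maxbitInner_eq_list (i - 1).toNat k i 1 m (by omega)]
        split_ifs with h1
        · rfl
        · exact ih n k (i + 1) _ (by omega)
      · rw [maxbitOuter, dif_neg hni, pyRange_one_nil i (n + 1) (by omega)]
        rfl


-- the update A performs on its running maximum m for a candidate x
def mstep (k m x : Int) : Int := if m < x ∧ x < k then x else m
theorem foldl_mstep_fix (k : Int) (f : Int → Int) (js : List Int) :
    js.foldl (fun m j => mstep k m (f j)) (k - 1) = k - 1 := by
  induction js with
  | nil => rfl
  | cons j js ih =>
      simp only [List.foldl_cons]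
      have : mstep k (k - 1) (f j) = k - 1 := by unfold mstep; split_ifs <;> omega
      rw [this, ih]

theorem maxbitInnerL_fst (k i : Int) (js : List Int) (m : Int) :
    (maxbitInnerL k i js m).1 = js.foldl (fun m j => mstep k m (PySem.Int.band i j)) m := by
  induction js generalizing m with
  | nil => rfl
  | cons j js ih =>
      simp only [maxbitInnerL, List.foldl_cons]
      by_cases h : m < PySem.Int.band i j ∧ PySem.Int.band i j < k
      · simp only [if_pos h]
        by_cases h2 : PySem.Int.band i j = k - 1
        · simp only [if_pos h2]
          have hm : mstep k m (PySem.Int.band i j) = k - 1 := by unfold mstep; split_ifs <;> omega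
          rw [hm, foldl_mstep_fix]
          omega
        · simp only [if_neg h2, ih]
          have hm : mstep k m (PySem.Int.band i j) = PySem.Int.band i j := by
            unfold mstep; split_ifs <;> omega
          rw [hm]
      · simp only [if_neg h, ih]
        have hm : mstep k m (PySem.Int.band i j) = m := by unfold mstep; split_ifs <;> omega
        rw [hm]

theorem maxbitInnerL_snd (k i : Int) (js : List Int) (m : Int) :
    (maxbitInnerL k i js m).2 = true → (maxbitInnerL k i js m).1 = k - 1 := by
  induction js generalizing m with
  | nil => simp [maxbitInnerL]
  | cons j js ih =>
      simp only [maxbitInnerL]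
      by_cases h : m < PySem.Int.band i j ∧ PySem.Int.band i j < k
      · simp only [if_pos h]
        by_cases h2 : PySem.Int.band i j = k - 1
        · simp [h2]
        · simp only [if_neg h2]; exact ih _
      · simp only [if_neg h]; exact ih _

-- the nested fold A computes (early returns erased)
def nfold (k : Int) (is : List Int) (m : Int) : Int :=
  is.foldl (fun m i => (PySem.List.pyRange 1 i 1).foldl
    (fun m j => mstep k m (PySem.Int.band i j)) m) m

theorem maxbitOuterL_eq_nfold (k : Int) (is : List Int) (m : Int) :
    maxbitOuterL k is m = nfold k is m := by
  induction is generalizing m with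
  | nil => rfl
  | cons i is ih =>
      simp only [maxbitOuterL, nfold, List.foldl_cons]
      by_cases h : (maxbitInnerL k i (PySem.List.pyRange 1 i 1) m).2 = true
      · rw [if_pos h]
        have h1 := maxbitInnerL_snd k i (PySem.List.pyRange 1 i 1) m h
        rw [maxbitInnerL_fst] at h1
        rw [maxbitInnerL_fst, h1]
        -- remaining outer iterations keep k - 1
        have : ∀ (l : List Int), l.foldl (fun m i => (PySem.List.pyRange 1 i 1).foldl
            (fun m j => mstep k m (PySem.Int.band i j)) m) (k - 1) = k - 1 := by
          intro l
          induction l with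
          | nil => rfl
          | cons a l ihl => simp only [List.foldl_cons, foldl_mstep_fix]; exact ihl
        exact (this is).symm
      · rw [if_neg h, ih, maxbitInnerL_fst]
        rfl

-- basic fold facts for the running maximum
theorem foldl_mstep_ge (k : Int) (f : Int → Int) (js : List Int) (m : Int) :
    m ≤ js.foldl (fun m j => mstep k m (f j)) m := by
  induction js generalizing m with
  | nil => simp
  | cons j js ih =>
      simp only [List.foldl_cons]
      refine le_trans ?_ (ih (mstep k m (f j)))
      unfold mstep; split_ifs <;> omega

theorem foldl_mstep_le (k : Int) (f : Int → Int) (js : List Int) (m c : Int)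
    (hm : m ≤ c) (h : ∀ j ∈ js, f j < k → f j ≤ c) :
    js.foldl (fun m j => mstep k m (f j)) m ≤ c := by
  induction js generalizing m with
  | nil => simpa
  | cons j js ih =>
      simp only [List.foldl_cons]
      refine ih _ ?_ (fun j hj => h j (List.mem_cons_of_mem _ hj))
      have := h j (List.mem_cons_self ..)
      unfold mstep; split_ifs <;> omega
theorem foldl_mstep_ge_mem (k : Int) (f : Int → Int) (js : List Int) (m j : Int)
    (hj : j ∈ js) (hk : f j < k) :
    f j ≤ js.foldl (fun m j => mstep k m (f j)) m := by
  obtain ⟨s, t, rfl⟩ := List.append_of_mem hj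
  rw [List.foldl_append, List.foldl_cons]
  refine le_trans ?_ (foldl_mstep_ge k f t _)
  unfold mstep; split_ifs <;> omega

-- nested versions
theorem nfold_ge (k : Int) (is : List Int) (m : Int) : m ≤ nfold k is m := by
  induction is generalizing m with
  | nil => simp [nfold]
  | cons i is ih =>
      simp only [nfold, List.foldl_cons]
      exact le_trans (foldl_mstep_ge k _ _ m) (ih _)

theorem nfold_le (k : Int) (is : List Int) (m c : Int) (hm : m ≤ c)
    (h : ∀ i ∈ is, ∀ j ∈ PySem.List.pyRange 1 i 1,
        PySem.Int.band i j < k → PySem.Int.band i j ≤ c) :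
    nfold k is m ≤ c := by
  induction is generalizing m with
  | nil => simpa [nfold]
  | cons i is ih =>
      simp only [nfold, List.foldl_cons]
      refine ih _ (foldl_mstep_le k _ _ m c hm (fun j hj => h i (List.mem_cons_self ..) j hj))
        (fun i' hi' => h i' (List.mem_cons_of_mem _ hi'))
theorem nfold_ge_mem (k : Int) (is : List Int) (m i j : Int)
    (hi : i ∈ is) (hj : j ∈ PySem.List.pyRange 1 i 1) (hk : PySem.Int.band i j < k) :
    PySem.Int.band i j ≤ nfold k is m := by
  obtain ⟨s, t, rfl⟩ := List.append_of_mem hi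
  unfold nfold
  rw [List.foldl_append, List.foldl_cons]
  exact le_trans (foldl_mstep_ge_mem k _ _ _ j hj hk) (nfold_ge k t _)

-- ===== bitwise lemmas (over Nat) =====

-- smallest strict bit-superset: if x's bits are contained in i's and x < i
-- then x ||| (x + 1) ≤ i
theorem even_lor_succ (x : Nat) (hx : x % 2 = 0) : x ||| (x + 1) = x + 1 := by
  apply Nat.eq_of_testBit_eq
  intro t
  cases t with
  | zero =>
      simp only [Nat.testBit_lor, Nat.testBit_zero]
      have h1 : ¬ (x % 2 = 1) := by omega
      have h2 : (x + 1) % 2 = 1 := by omega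
      simp [h1, h2]
  | succ t =>
      rw [Nat.testBit_lor]
      simp only [Nat.testBit_succ]
      have h3 : (x + 1) / 2 = x / 2 := by omega
      rw [h3, Bool.or_self]

theorem lor_succ_le_of_subset : ∀ x i : Nat, x &&& i = x → x < i → x ||| (x + 1) ≤ i := by
  intro x
  induction x using Nat.strong_induction_on with
  | _ x ih =>
    intro i hsub hlt
    rcases Nat.even_or_odd x with he | ho
    · have h2 : x % 2 = 0 := Nat.even_iff.mp he
      rw [even_lor_succ x h2]; omega
    · have hx2 : x % 2 = 1 := Nat.odd_iff.mp ho
      set a := x / 2 with ha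
      set b := i / 2 with hb
      have hxa : x = 2 * a + 1 := by omega
      have hi2 : i % 2 = 1 := by
        have h5 : (x &&& i).testBit 0 = x.testBit 0 := by rw [hsub]
        rw [Nat.testBit_land, Nat.testBit_zero, Nat.testBit_zero] at h5
        simp [hx2] at h5
        exact h5
      have hia : i = 2 * b + 1 := by omega
      have hab_sub : a &&& b = a := by
        apply Nat.eq_of_testBit_eq
        intro t
        have h5 : (x &&& i).testBit (t + 1) = x.testBit (t + 1) := by rw [hsub]
        rw [Nat.testBit_land, Nat.testBit_succ, Nat.testBit_succ] at h5
        rw [Nat.testBit_land]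
        exact h5
      have hab_lt : a < b := by omega
      have hIH : a ||| (a + 1) ≤ b := ih a (by omega) b hab_sub hab_lt
      have key : x ||| (x + 1) = 2 * (a ||| (a + 1)) + 1 := by
        apply Nat.eq_of_testBit_eq
        intro t
        cases t with
        | zero =>
            simp only [Nat.testBit_lor, Nat.testBit_zero]
            have h2 : (2 * (a ||| (a + 1)) + 1) % 2 = 1 := by omega
            simp [hx2, h2]
        | succ t =>
            rw [Nat.testBit_lor]
            simp only [Nat.testBit_succ]
            have h3 : (x + 1) / 2 = a + 1 := by omega
            have h4 : (2 * (a ||| (a + 1)) + 1) / 2 = a ||| (a + 1) := by omega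
            rw [h3, h4, ← ha, Nat.testBit_lor]
      omega

theorem land_lor_succ (v : Nat) : (v ||| (v + 1)) &&& v = v := by
  apply Nat.eq_of_testBit_eq
  intro t
  simp [Nat.testBit_land, Nat.testBit_lor]
  intro h; simp [h]

theorem lt_lor_succ (v : Nat) : v < v ||| (v + 1) :=
  lt_of_lt_of_le (Nat.lt_succ_self v) (Nat.right_le_or ..)

-- x = i &&& j has bits contained in i
theorem band_absorb (i j : Nat) : (i &&& j) &&& i = i &&& j := by
  apply Nat.eq_of_testBit_eq
  intro t
  simp [Nat.testBit_land]
  intro h1 h2; exact h1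

-- ===== B's loop characterization =====

theorem maxbitLoop_spec (n : Int) (t : Nat) :
    (maxbitLoop n t = 0 ∧ ∀ s : Nat, 1 ≤ s → s ≤ t → ¬ ((s ||| (s + 1) : Nat) : Int) ≤ n) ∨
    (∃ s : Nat, 1 ≤ s ∧ s ≤ t ∧ maxbitLoop n t = (s : Int) ∧ ((s ||| (s + 1) : Nat) : Int) ≤ n ∧
      ∀ w : Nat, s < w → w ≤ t → ¬ ((w ||| (w + 1) : Nat) : Int) ≤ n) := by
  induction t with
  | zero => left; exact ⟨rfl, by omega⟩
  | succ t ih =>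
      have hcast : PySem.Int.bor ((t : Int) + 1) ((t : Int) + 1 + 1)
          = ((((t + 1) ||| (t + 1 + 1)) : Nat) : Int) := by
        have h2 := PySem.Int.bor_natCast (t + 1) (t + 1 + 1)
        push_cast at h2
        rw [show ((t : Int) + 1 + 1) = ((t : Int) + 2) by ring] at h2 ⊢
        rw [h2]
      by_cases h : PySem.Int.bor ((t : Int) + 1) (((t : Int) + 1) + 1) ≤ n
      · right
        refine ⟨t + 1, by omega, le_refl _, ?_, ?_, by omega⟩
        · simp only [maxbitLoop]
          rw [if_pos h]; push_cast; omega
        · rw [hcast] at h; exact h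
      · have hrec : maxbitLoop n (t + 1) = maxbitLoop n t := by
          simp only [maxbitLoop]; rw [if_neg h]
        have hnot : ¬ ((((t + 1) ||| (t + 1 + 1)) : Nat) : Int) ≤ n := by
          rw [← hcast]; exact h
        rcases ih with ⟨h0, hall⟩ | ⟨s, hs1, hst, hval, hcond, hmax⟩
        · left
          refine ⟨hrec.trans h0, ?_⟩
          intro s h1 h2
          rcases Nat.lt_or_ge s (t + 1) with hlt | hge
          · exact hall s h1 (by omega)
          · have : s = t + 1 := by omega
            subst this; exact hnot
        · right
          refine ⟨s, hs1, by omega, hrec.trans hval, hcond, ?_⟩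
          intro w hw1 hw2
          rcases Nat.lt_or_ge w (t + 1) with hlt | hge
          · exact hmax w hw1 (by omega)
          · have : w = t + 1 := by omega
            subst this; exact hnot

-- every pair AND that A considers and that is positive is a feasible candidate of B's search
theorem elig (n k i j : Int) (hi1 : 1 ≤ i) (hin : i < n + 1) (hj1 : 1 ≤ j) (hji : j < i)
    (hx : 0 < PySem.Int.band i j) (hk : PySem.Int.band i j < k) :
    ∃ s : Nat, 1 ≤ s ∧ (s : Int) ≤ min (k - 1) (n - 1) ∧
      (((s ||| (s + 1)) : Nat) : Int) ≤ n ∧ (s : Int) = PySem.Int.band i j := by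
  have hia : ((i.toNat : Int)) = i := Int.toNat_of_nonneg (by omega)
  have hib : ((j.toNat : Int)) = j := Int.toNat_of_nonneg (by omega)
  have hband : PySem.Int.band i j = (((i.toNat &&& j.toNat) : Nat) : Int) := by
    conv_lhs => rw [← hia, ← hib]
    rw [PySem.Int.band_natCast]
  refine ⟨i.toNat &&& j.toNat, ?_, ?_, ?_, hband.symm⟩
  · rw [hband] at hx; exact_mod_cast hx
  · have h1 : (((i.toNat &&& j.toNat) : Nat) : Int) ≤ (j.toNat : Int) := by
      exact_mod_cast Nat.and_le_right
    rw [hband] at hk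
    rw [hib] at h1
    omega
  · have hsubs : (i.toNat &&& j.toNat) &&& i.toNat = i.toNat &&& j.toNat :=
      band_absorb i.toNat j.toNat
    have hltn : i.toNat &&& j.toNat < i.toNat := by
      have h1 : i.toNat &&& j.toNat ≤ j.toNat := Nat.and_le_right
      have h2 : (j.toNat : Int) < (i.toNat : Int) := by rw [hia, hib]; exact hji
      exact lt_of_le_of_lt h1 (by exact_mod_cast h2)
    have := lor_succ_le_of_subset (i.toNat &&& j.toNat) i.toNat hsubs hltn
    have h3 : ((((i.toNat &&& j.toNat) ||| ((i.toNat &&& j.toNat) + 1)) : Nat) : Int)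
        ≤ (i.toNat : Int) := by exact_mod_cast this
    rw [hia] at h3
    omega

theorem maxbit_eq (n k : Int) : maxbit n k = maxbit_alt n k := by
  have hA : maxbit n k = nfold k (PySem.List.pyRange 1 (n + 1) 1) 0 := by
    unfold maxbit
    rw [maxbitOuter_eq_list n.toNat n k 1 0 (by omega), maxbitOuterL_eq_nfold]
  rw [hA]
  unfold maxbit_alt
  by_cases hnk : n < 2 ∨ k ≤ 1
  · rw [if_pos hnk]
    refine le_antisymm ?_ (nfold_ge k _ 0)
    apply nfold_le _ _ _ _ (le_refl 0)
    intro i hi j hj hk2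
    rw [PySem.List.mem_pyRange_one] at hi hj
    rcases hnk with h | h
    · omega
    · have h0 : 0 ≤ PySem.Int.band i j := by
        have hia : ((i.toNat : Int)) = i := Int.toNat_of_nonneg (by omega)
        have hib : ((j.toNat : Int)) = j := Int.toNat_of_nonneg (by omega)
        rw [← hia, ← hib, PySem.Int.band_natCast]
        exact Int.natCast_nonneg _
      omega
  · rw [if_neg hnk]
    push_neg at hnk
    obtain ⟨hn2, hk2⟩ := hnk
    have ht0 : ((min (k - 1) (n - 1)).toNat : Int) = min (k - 1) (n - 1) :=
      Int.toNat_of_nonneg (by omega)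
    rcases maxbitLoop_spec n (min (k - 1) (n - 1)).toNat with ⟨h0, hall⟩ | ⟨s, hs1, hst, hval, hcond, hmax⟩
    · rw [h0]
      refine le_antisymm ?_ (nfold_ge k _ 0)
      apply nfold_le _ _ _ _ (le_refl 0)
      intro i hi j hj hklt
      rw [PySem.List.mem_pyRange_one] at hi hj
      by_contra hpos
      push_neg at hpos
      obtain ⟨s, hs1, hsle, hscond, hsval⟩ :=
        elig n k i j (by omega) (by omega) (by omega) (by omega) (by omega) hklt
      exact hall s hs1 (by omega) hscond
    · rw [hval]
      have hsmin : (s : Int) ≤ min (k - 1) (n - 1) := by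
        calc (s : Int) ≤ ((min (k - 1) (n - 1)).toNat : Int) := by exact_mod_cast hst
        _ = _ := ht0
      refine le_antisymm ?_ ?_
      · -- upper bound: every eligible candidate is at most s
        apply nfold_le _ _ _ _ (by positivity)
        intro i hi j hj hklt
        rw [PySem.List.mem_pyRange_one] at hi hj
        rcases le_or_gt (PySem.Int.band i j) 0 with hle | hgt
        · have : (0 : Int) ≤ (s : Int) := Int.natCast_nonneg _
          omega
        · obtain ⟨w, hw1, hwle, hwcond, hwval⟩ :=
            elig n k i j (by omega) (by omega) (by omega) (by omega) hgt hklt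
          have hws : w ≤ s := by
            by_contra hgt2
            push_neg at hgt2
            exact hmax w hgt2 (by omega) hwcond
          rw [← hwval]
          exact_mod_cast hws
      · -- lower bound: B's answer is realized by the pair (s ||| (s+1), s)
        have hlor1 : (s : Int) < (((s ||| (s + 1)) : Nat) : Int) := by
          exact_mod_cast lt_lor_succ s
        have hband : PySem.Int.band ((((s ||| (s + 1)) : Nat) : Int)) ((s : Int)) = (s : Int) := by
          rw [PySem.Int.band_natCast]
          exact_mod_cast land_lor_succ s
        have hmem1 : ((((s ||| (s + 1)) : Nat) : Int)) ∈ PySem.List.pyRange 1 (n + 1) 1 := by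
          rw [PySem.List.mem_pyRange_one]
          constructor
          · have : (1 : Int) ≤ (s : Int) := by exact_mod_cast hs1
            omega
          · omega
        have hmem2 : (s : Int) ∈ PySem.List.pyRange 1 ((((s ||| (s + 1)) : Nat) : Int)) 1 := by
          rw [PySem.List.mem_pyRange_one]
          refine ⟨by exact_mod_cast hs1, hlor1⟩
        have := nfold_ge_mem k (PySem.List.pyRange 1 (n + 1) 1) 0
          ((((s ||| (s + 1)) : Nat) : Int)) ((s : Int)) hmem1 hmem2 (by rw [hband]; omega)
        rw [hband] at this
        exact this

-- ===== VERDICT (by name: the statement is the Claim_ definition above) =====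
theorem maxbit_spec : Claim_equal_maxbit := by
  intro n k _
  unfold Spec_maxbit
  exact maxbit_eq n k
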